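-- pv_equiv track=rewrite | github.com/filipelsilva/ContactBook | translators.py | text_to_contact
-- ===== SOURCE A (Python) =====
-- def text_to_contact(text):
--     i = 0
--     name = ""
--     number = ""
--     email = ""
--
--     while text[i] != ":":
--         name += text[i]
--         i += 1
--
--     i += 1
--     while text[i] != ":":
--         number += text[i]
--         i += 1
--
--     i += 1
--     email = text[i:-1]
--
--     return name, number, email
-- ===== SOURCE B (Python) =====
-- def text_to_contact(text):
--     parts = text.split(":", 2)
--     return parts[0], parts[1], parts[2][:-1]
-- ===== Notes on version B (the rewrite author's own statement) =====
-- stated objective: idiomatic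
-- what changed: Replaced the two manual character-by-character scanning loops with a single maxsplit-2 str.split call plus indexing, with a final slice dropping the trailing character exactly as A does.
import Mathlib
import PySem

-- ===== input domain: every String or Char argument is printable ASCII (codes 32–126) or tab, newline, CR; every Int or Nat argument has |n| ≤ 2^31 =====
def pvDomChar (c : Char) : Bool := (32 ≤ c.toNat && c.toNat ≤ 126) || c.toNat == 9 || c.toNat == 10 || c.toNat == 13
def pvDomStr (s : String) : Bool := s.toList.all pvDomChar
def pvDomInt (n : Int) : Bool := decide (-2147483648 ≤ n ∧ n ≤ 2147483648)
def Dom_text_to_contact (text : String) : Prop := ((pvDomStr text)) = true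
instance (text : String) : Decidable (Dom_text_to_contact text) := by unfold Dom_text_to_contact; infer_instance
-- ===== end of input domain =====

-- B replaces A's two manual character-scanning loops with one str.split(":", 2) call (idiomatic).

-- ===== PORT A =====
-- A's 'while text[i] != ":"' loop: consume characters into acc until a ':' is hit;
-- an exhausted list is Python's IndexError (excluded by Pre_).
def pvScanA (acc : List Char) : List Char → List Char × List Char
  | [] => (acc, [])
  | c :: rest => if c = ':' then (acc, rest) else pvScanA (acc ++ [c]) rest

def text_to_contact (text : String) : String × String × String :=
  let p1 := pvScanA [] text.toList        -- first while loop: (name, rest after first ':')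
  let p2 := pvScanA [] p1.2               -- second while loop: (number, rest after second ':')
  let email := PySem.List.slice p2.2 none (some (-1))   -- text[i:-1] on the remaining suffix
  (String.ofList p1.1, String.ofList p2.1, String.ofList email)

-- ===== PORT B =====
def text_to_contact_alt (text : String) : String × String × String :=
  match PySem.Str.splitMax? text ":" 2 with            -- text.split(":", 2)
  | none => ("", "", "")                               -- unreachable: the separator ":" is nonempty
  | some parts =>
    -- parts[0], parts[1], parts[2][:-1]; a missing part is Python's IndexError (excluded by Pre_)
    ((PySem.List.pyGet? parts 0).getD "",
     (PySem.List.pyGet? parts 1).getD "",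
     PySem.Str.slice ((PySem.List.pyGet? parts 2).getD "") none (some (-1)))

-- ===== PRECONDITION & SPEC =====
-- Pre_ excludes exactly the strings with fewer than two ':' characters, on which A
-- (and B alike) raises IndexError.
def Pre_text_to_contact (text : String) : Prop := 2 ≤ text.toList.count ':'
instance (text : String) : Decidable (Pre_text_to_contact text) := by unfold Pre_text_to_contact; infer_instance
def pvWitness_text_to_contact : String := "ana:912:a@b.c\n"

def Spec_text_to_contact (text : String) (out : String × String × String) : Prop := out = text_to_contact_alt text
instance (text : String) (out : String × String × String) : Decidable (Spec_text_to_contact text out) := by unfold Spec_text_to_contact; infer_instance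

-- ===== CLAIM (what is proved, stated in full; the proofs are below) =====
def Claim_equal_text_to_contact : Prop := ∀ (text : String), Dom_text_to_contact text → Pre_text_to_contact text → Spec_text_to_contact text (text_to_contact text)

-- ===== LEMMAS AND PROOFS =====

-- the prefix of l before its first ':' and the suffix after it (proof-only abbreviations)
def pvHead (l : List Char) : List Char := l.takeWhile (· ≠ ':')
def pvTail (l : List Char) : List Char := (l.dropWhile (· ≠ ':')).tail

-- A's scanning loop, characterised
theorem pvScanA_eq (l : List Char) : ∀ acc : List Char, ':' ∈ l →
    pvScanA acc l = (acc ++ pvHead l, pvTail l) := by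
  induction l with
  | nil => intro acc h; cases h
  | cons c rest ih =>
    intro acc h
    by_cases hc : c = ':'
    · subst hc; simp [pvScanA, pvHead, pvTail]
    · have hmem : ':' ∈ rest := by
        rcases List.mem_cons.mp h with h | h
        · exact absurd h.symm hc
        · exact h
      simp [pvScanA, hc, ih _ hmem, pvHead, pvTail]

theorem pvDropWhile_colon (l : List Char) (h : ':' ∈ l) :
    l.dropWhile (· ≠ ':') = ':' :: pvTail l := by
  unfold pvTail
  induction l with
  | nil => cases h
  | cons c rest ih =>
    by_cases hc : c = ':'
    · subst hc; simp [List.dropWhile]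
    · have hmem : ':' ∈ rest := by
        rcases List.mem_cons.mp h with h | h
        · exact absurd h.symm hc
        · exact h
      simpa [List.dropWhile, hc] using ih hmem

theorem pvCount_tail (l : List Char) (h : ':' ∈ l) :
    (pvTail l).count ':' + 1 = l.count ':' := by
  conv_rhs => rw [← List.takeWhile_append_dropWhile (p := (· ≠ ':')) (l := l)]
  rw [List.count_append, pvDropWhile_colon l h]
  have htw : List.count ':' (List.takeWhile (fun x => !decide (x = ':')) l) = 0 := by
    refine List.count_eq_zero.mpr (fun hm => ?_)
    have := List.mem_takeWhile_imp hm
    simp at this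
  simp [htw]

theorem pvGo_m0 (fuel : Nat) (l cur : List Char) (acc : List (List Char)) :
    PySem.Chars.splitOnMax.go [':'] fuel 0 l cur acc = ((cur.reverse ++ l) :: acc).reverse := by
  cases fuel <;> cases l <;> simp [PySem.Chars.splitOnMax.go]

theorem pvGo_split (l : List Char) : ∀ (fuel m : Nat) (cur : List Char) (acc : List (List Char)),
    l.length < fuel → ':' ∈ l → m ≠ 0 →
    ∃ fuel', (pvTail l).length < fuel' ∧
      PySem.Chars.splitOnMax.go [':'] fuel m l cur acc =
      PySem.Chars.splitOnMax.go [':'] fuel' (m-1) (pvTail l) []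
        ((cur.reverse ++ pvHead l) :: acc) := by
  induction l with
  | nil => intro fuel m cur acc _ h _; cases h
  | cons c rest ih =>
    intro fuel m cur acc hf h hm
    cases fuel with
    | zero => omega
    | succ f =>
      by_cases hc : c = ':'
      · subst hc
        refine ⟨f, by simp [pvTail, List.dropWhile] at hf ⊢; omega, ?_⟩
        simp [PySem.Chars.splitOnMax.go, hm, List.isPrefixOf, pvHead, pvTail,
              List.dropWhile, List.takeWhile]
      · have hmem : ':' ∈ rest := by
          rcases List.mem_cons.mp h with h | h
          · exact absurd h.symm hc
          · exact h
        have hstep : PySem.Chars.splitOnMax.go [':'] (f+1) m (c::rest) cur acc =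
            PySem.Chars.splitOnMax.go [':'] f m rest (c::cur) acc := by
          simp [PySem.Chars.splitOnMax.go, hm, Ne.symm hc, List.isPrefixOf]
        obtain ⟨f', hlt, he⟩ := ih f m (c::cur) acc (by simp at hf ⊢; omega) hmem hm
        refine ⟨f', ?_, ?_⟩
        · simpa [pvTail, List.dropWhile, hc] using hlt
        · rw [hstep, he]
          simp [pvHead, pvTail, List.dropWhile, List.takeWhile, hc]

-- ===== VERDICT (by name: the statement is the Claim_ definition above) =====
theorem text_to_contact_spec : Claim_equal_text_to_contact := by
  intro text _ hpre
  unfold Spec_text_to_contact text_to_contact text_to_contact_alt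
  unfold Pre_text_to_contact at hpre
  have h1 : ':' ∈ text.toList := List.count_pos_iff.mp (by omega)
  have hc1 := pvCount_tail text.toList h1
  have h2 : ':' ∈ pvTail text.toList := List.count_pos_iff.mp (by omega)
  obtain ⟨f1, hf1, e1⟩ :=
    pvGo_split text.toList (text.toList.length + 1) 2 [] [] (by omega) h1 (by omega)
  obtain ⟨f2, hf2, e2⟩ :=
    pvGo_split (pvTail text.toList) f1 1 [] [pvHead text.toList] hf1 h2 (by omega)
  simp only [List.reverse_nil, List.nil_append] at e1 e2
  have hsplit : PySem.Chars.splitOnMax text.toList [':'] 2 =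
      [pvHead text.toList, pvHead (pvTail text.toList), pvTail (pvTail text.toList)] := by
    unfold PySem.Chars.splitOnMax
    rw [if_neg (by norm_num)]
    have ht : (2 : Int).toNat = 2 := rfl
    rw [ht, e1]
    norm_num
    rw [e2]
    norm_num
    rw [pvGo_m0]
    simp
  have htl : (":" : String).toList = [':'] := rfl
  have hsm : PySem.Str.splitMax? text ":" 2 =
      some [String.ofList (pvHead text.toList), String.ofList (pvHead (pvTail text.toList)),
            String.ofList (pvTail (pvTail text.toList))] := by
    unfold PySem.Str.splitMax? PySem.Chars.splitMax?
    rw [htl]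
    simp [hsplit]
  rw [hsm, pvScanA_eq text.toList [] h1]
  simp only [List.nil_append]
  rw [pvScanA_eq (pvTail text.toList) [] h2]
  simp [PySem.List.pyGet?, PySem.List.pyIdx?, PySem.Str.slice, PySem.Chars.slice]
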